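-- pv_equiv track=rewrite | github.com/futuroptimist/sugarkube | tests/test_cloudflare_tunnel_recipe.py | _extract_recipe
-- ===== SOURCE A (Python) =====
-- def _extract_recipe(lines: list[str], header: str) -> list[str]:
--     collecting = False
--     body: list[str] = []
--     indent = "    "
--     for line in lines:
--         if not collecting:
--             if line.startswith(header):
--                 collecting = True
--             continue
--         if line and not line.startswith(indent):
--             break
--         body.append(line)
--     return body
-- ===== SOURCE B (Python) =====
-- def _extract_recipe(lines: list[str], header: str) -> list[str]:
--     start = next((i for i, line in enumerate(lines) if line.startswith(header)), None)
--     if start is None: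
--         return []
--     end = next(
--         (j for j in range(start + 1, len(lines))
--          if lines[j] and not lines[j].startswith("    ")),
--         len(lines),
--     )
--     return lines[start + 1 : end]
-- ===== Notes on version B (the rewrite author's own statement) =====
-- stated objective: alternative
-- what changed: Replaced the flag-driven accumulator loop with two index searches (find the header line, then find the end of the indented block) followed by a single slice.
import Mathlib
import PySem

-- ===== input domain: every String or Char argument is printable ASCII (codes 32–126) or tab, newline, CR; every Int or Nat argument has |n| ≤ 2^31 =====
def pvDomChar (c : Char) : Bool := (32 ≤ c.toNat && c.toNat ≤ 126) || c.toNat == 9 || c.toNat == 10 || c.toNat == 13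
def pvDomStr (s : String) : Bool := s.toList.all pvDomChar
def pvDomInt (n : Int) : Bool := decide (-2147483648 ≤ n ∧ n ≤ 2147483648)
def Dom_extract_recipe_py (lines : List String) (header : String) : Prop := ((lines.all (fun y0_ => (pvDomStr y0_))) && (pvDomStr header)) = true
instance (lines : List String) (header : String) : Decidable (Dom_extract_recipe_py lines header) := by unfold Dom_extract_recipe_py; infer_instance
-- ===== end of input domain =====

-- B replaces A's flag-driven accumulator loop with two index searches (header line, end of block) and one slice; objective: alternative decomposition.

-- ===== PORT A =====
-- A's single loop over `lines` with state (collecting, body); `break` returns body.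
def extractRecipeGoA (header : String) : List String → Bool → List String → List String
  | [], _, body => body
  | l :: ls, true, body =>
    if l ≠ "" ∧ ¬ (PySem.Str.startswith l "    " = true) then body
    else extractRecipeGoA header ls true (body ++ [l])
  | l :: ls, false, body =>
    if PySem.Str.startswith l header then extractRecipeGoA header ls true body
    else extractRecipeGoA header ls false body

def extract_recipe_py (lines : List String) (header : String) : List String :=
  extractRecipeGoA header lines false []

-- ===== PORT B =====
-- stop condition of B's second search: a truthy line that is not indented
def extractRecipeStopB (l : String) : Bool := l ≠ "" && ! PySem.Str.startswith l "    "

def extract_recipe_py_alt (lines : List String) (header : String) : List String :=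
  match lines.findIdx? (fun l => PySem.Str.startswith l header) with
  | none => []
  | some i =>
    let rest := lines.drop (i + 1)
    match rest.findIdx? extractRecipeStopB with
    | none => rest
    | some k => rest.take k

-- ===== PRECONDITION & SPEC =====
def Spec_extract_recipe_py (lines : List String) (header : String) (out : List String) : Prop := out = extract_recipe_py_alt lines header
instance (lines : List String) (header : String) (out : List String) : Decidable (Spec_extract_recipe_py lines header out) := by unfold Spec_extract_recipe_py; infer_instance

-- ===== CLAIM (what is proved, stated in full; the proofs are below) =====
def Claim_equal_extract_recipe_py : Prop := ∀ (lines : List String) (header : String), Dom_extract_recipe_py lines header → Spec_extract_recipe_py lines header (extract_recipe_py lines header)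

-- ===== LEMMAS AND PROOFS =====

-- A's collecting phase prepends its accumulator
lemma goA_true_acc (header : String) (ls : List String) (body : List String) :
    extractRecipeGoA header ls true body = body ++ extractRecipeGoA header ls true [] := by
  induction ls generalizing body with
  | nil => simp [extractRecipeGoA]
  | cons l ls ih =>
    simp only [extractRecipeGoA, List.nil_append]
    by_cases h : l ≠ "" ∧ ¬ (PySem.Str.startswith l "    " = true)
    · rw [if_pos h, if_pos h]; simp
    · rw [if_neg h, if_neg h, ih (body ++ [l]), ih [l], List.append_assoc]

-- A's collecting phase equals B's second search + slice
lemma goA_true_eq (header : String) (ls : List String) :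
    extractRecipeGoA header ls true [] =
      (match ls.findIdx? extractRecipeStopB with
       | none => ls
       | some k => ls.take k) := by
  induction ls with
  | nil => simp [extractRecipeGoA]
  | cons l ls ih =>
    rw [List.findIdx?_cons]
    by_cases he : l = ""
    · have hstop : extractRecipeStopB l = false := by simp [extractRecipeStopB, he]
      rw [hstop]
      simp only [extractRecipeGoA, he]
      rw [if_neg (by simp), goA_true_acc, List.nil_append, ih]
      cases hfi : ls.findIdx? extractRecipeStopB <;> simp
    · by_cases hs : PySem.Str.startswith l "    " = true
      · have hs' : PySem.Chars.startswith l.toList [' ', ' ', ' ', ' '] = true := by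
          simpa using hs
        have hstop : extractRecipeStopB l = false := by
          simp [extractRecipeStopB, hs']
        rw [hstop]
        simp only [extractRecipeGoA]
        rw [if_neg (fun hc => hc.2 hs), goA_true_acc, List.nil_append, ih]
        cases hfi : ls.findIdx? extractRecipeStopB <;> simp
      · have hs' : PySem.Chars.startswith l.toList [' ', ' ', ' ', ' '] = false := by
          simpa using hs
        have hstop : extractRecipeStopB l = true := by
          simp [extractRecipeStopB, he, hs']
        rw [hstop]
        simp only [extractRecipeGoA]
        rw [if_pos ⟨he, hs⟩]
        simp

-- A's seeking phase equals B's first search then the collecting phase on the tail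
lemma goA_false_eq (header : String) (ls : List String) :
    extractRecipeGoA header ls false [] =
      (match ls.findIdx? (fun l => PySem.Str.startswith l header) with
       | none => []
       | some i => extractRecipeGoA header (ls.drop (i + 1)) true []) := by
  induction ls with
  | nil => simp [extractRecipeGoA]
  | cons l ls ih =>
    rw [List.findIdx?_cons]
    by_cases h : PySem.Str.startswith l header = true
    · rw [if_pos h]
      simp only [extractRecipeGoA]
      rw [if_pos h]
      simp
    · rw [if_neg h]
      simp only [extractRecipeGoA]
      rw [if_neg h, ih]
      cases hfi : ls.findIdx? (fun l => PySem.Str.startswith l header) <;> simp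

-- ===== VERDICT (by name: the statement is the Claim_ definition above) =====
theorem extract_recipe_py_spec : Claim_equal_extract_recipe_py := by
  intro lines header _
  unfold Spec_extract_recipe_py extract_recipe_py extract_recipe_py_alt
  rw [goA_false_eq]
  cases hfi : lines.findIdx? (fun l => PySem.Str.startswith l header) with
  | none => simp
  | some i => simp only [goA_true_eq]
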